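-- pv_equiv track=rewrite | github.com/quietray/perfomanslab | task1/task1.py | generate_circular_path
-- ===== SOURCE A (Python) =====
-- def generate_circular_path(n, m):
--     circular_array = list(range(1, n + 1))
--     path = []
--     current_index = 0
--
--     while True:
--         path.append(circular_array[current_index])
--         next_index = (current_index + m - 1) % n
--         if next_index == 0:
--             break
--         current_index = next_index
--
--     return ''.join(map(str, path))
-- ===== SOURCE B (Python) =====
-- def _gcd(a, b):
--     while b:
--         a, b = b, a % b
--     return a
--
--
-- def generate_circular_path(n, m):
--     arr = list(range(1, n + 1))
--     path = [arr[0]]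
--     step = (m - 1) % n
--     count = n // _gcd(n, step)
--     path.extend(arr[(k * step) % n] for k in range(1, count))
--     return ''.join(map(str, path))
-- ===== Notes on version B (the rewrite author's own statement) =====
-- stated objective: alternative
-- what changed: B replaces A's while-loop with runtime return-to-zero detection by a closed-form cycle length n // gcd(n, (m-1) % n) and a direct comprehension over the stepped indices.
import Mathlib
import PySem

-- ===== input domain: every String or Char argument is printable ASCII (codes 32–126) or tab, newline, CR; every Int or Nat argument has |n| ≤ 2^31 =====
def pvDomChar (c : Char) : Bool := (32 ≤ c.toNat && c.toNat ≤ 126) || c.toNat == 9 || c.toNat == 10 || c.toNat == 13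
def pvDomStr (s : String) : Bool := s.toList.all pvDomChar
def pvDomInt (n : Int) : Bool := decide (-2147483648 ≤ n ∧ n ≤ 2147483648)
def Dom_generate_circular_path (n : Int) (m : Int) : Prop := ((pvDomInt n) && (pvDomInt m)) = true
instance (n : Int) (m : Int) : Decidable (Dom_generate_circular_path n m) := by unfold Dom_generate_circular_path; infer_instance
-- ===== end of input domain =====

-- B computes the cycle length in closed form (n // gcd(n, (m-1) % n)) and lists the
-- stepped indices directly, instead of A's while-loop that detects the return to
-- index 0 at runtime (objective: alternative).

-- ===== PORT A =====
-- A's while-loop; the fuel n.toNat+1 is a totality guard only (the loop appends at most n values)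
def pvLoopA (n m : Int) (arr : List Int) : Nat → Int → List Int → List Int
  | 0, _, path => path
  | fuel+1, cur, path =>
    match PySem.List.pyGet? arr cur with
    | none => path          -- IndexError (only reachable outside Pre_)
    | some v =>
      let path' := path ++ [v]
      let next := PySem.Int.mod (cur + m - 1) n
      if next = 0 then path' else pvLoopA n m arr fuel next path'

def generate_circular_path (n : Int) (m : Int) : String :=
  let arr := PySem.List.pyRange 1 (n + 1) 1
  let path := pvLoopA n m arr (n.toNat + 1) 0 []
  PySem.Str.join "" (path.map PySem.Int.toStr)

-- ===== PORT B =====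
-- Source B's hand-written Euclid loop; the fuel n.natAbs+1 is a totality guard only
def pvGcdLoop : Nat → Int → Int → Int
  | 0, a, _ => a
  | fuel+1, a, b => if b ≠ 0 then pvGcdLoop fuel b (PySem.Int.mod a b) else a

def generate_circular_path_alt (n : Int) (m : Int) : String :=
  let arr := PySem.List.pyRange 1 (n + 1) 1
  match PySem.List.pyGet? arr 0 with
  | none => ""              -- IndexError for n ≤ 0 (outside Pre_)
  | some h =>
    let step := PySem.Int.mod (m - 1) n
    let count := PySem.Int.floordiv n (pvGcdLoop (n.natAbs + 1) n step)
    let path := h :: (PySem.List.pyRange 1 count 1).map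
        (fun k => PySem.List.pyGetD arr (PySem.Int.mod (k * step) n) 0)
    PySem.Str.join "" (path.map PySem.Int.toStr)

-- ===== PRECONDITION & SPEC =====
-- Pre_ excludes exactly n ≤ 0, on which A raises IndexError (circular_array is empty).
def Pre_generate_circular_path (n : Int) (m : Int) : Prop := 1 ≤ n
instance (n : Int) (m : Int) : Decidable (Pre_generate_circular_path n m) := by
  unfold Pre_generate_circular_path; infer_instance

def pvWitness_generate_circular_path : Int × Int := (5, 3)

def Spec_generate_circular_path (n : Int) (m : Int) (out : String) : Prop := out = generate_circular_path_alt n m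
instance (n : Int) (m : Int) (out : String) : Decidable (Spec_generate_circular_path n m out) := by unfold Spec_generate_circular_path; infer_instance

-- ===== CLAIM (what is proved, stated in full; the proofs are below) =====
def Claim_equal_generate_circular_path : Prop := ∀ (n : Int) (m : Int), Dom_generate_circular_path n m → Pre_generate_circular_path n m → Spec_generate_circular_path n m (generate_circular_path n m)

-- ===== LEMMAS AND PROOFS =====

-- abbreviations used only by the proofs
def pvN (n : Int) : Nat := n.toNat
def pvS (n m : Int) : Nat := (PySem.Int.mod (m - 1) n).toNat
def pvC (n m : Int) : Nat := pvN n / Nat.gcd (pvN n) (pvS n m)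
def pvF (n m : Int) (k : Nat) : Int := ((k * pvS n m % pvN n : Nat) : Int) + 1

theorem pvN_pos (n : Int) (hn : 1 ≤ n) : 0 < pvN n := by simp [pvN]; omega

theorem pv_dvd_iff (N S k : Nat) (hN : 0 < N) : N ∣ k * S ↔ (N / Nat.gcd N S) ∣ k := by
  obtain ⟨N', hN'⟩ := Nat.gcd_dvd_left N S
  obtain ⟨S', hS'⟩ := Nat.gcd_dvd_right N S
  set d := Nat.gcd N S with hd
  have hd0 : 0 < d := Nat.gcd_pos_of_pos_left _ hN
  have hNq : N / d = N' := by rw [hN']; exact Nat.mul_div_cancel_left _ hd0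
  have hSq : S / d = S' := by rw [hS']; exact Nat.mul_div_cancel_left _ hd0
  have hcop : Nat.Coprime N' S' := by rw [← hNq, ← hSq]; exact Nat.coprime_div_gcd_div_gcd hd0
  rw [hNq, hN', hS']
  constructor
  · intro h
    have h1 : d * N' ∣ d * (k * S') := by
      rw [show d * (k * S') = k * (d * S') from by ring]; exact h
    exact hcop.dvd_of_dvd_mul_right ((Nat.mul_dvd_mul_iff_left hd0).mp h1)
  · rintro ⟨j, rfl⟩
    exact ⟨j * S', by ring⟩

theorem pv_gcdLoop_eq : ∀ (fuel : Nat) (a b : Int), 0 ≤ a → 0 ≤ b → b.toNat < fuel →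
    pvGcdLoop fuel a b = ((Nat.gcd b.toNat a.toNat : Nat) : Int) := by
  intro fuel
  induction fuel with
  | zero => intro a b _ _ hf; omega
  | succ f ih =>
    intro a b ha hb hf
    by_cases hb0 : b = 0
    · simp [pvGcdLoop, hb0, Int.toNat_of_nonneg ha]
    · have hbpos : 0 < b := lt_of_le_of_ne hb (Ne.symm hb0)
      have hmod : PySem.Int.mod a b = a % b := PySem.Int.mod_eq_emod_of_pos hbpos
      have hmn : 0 ≤ a % b := Int.emod_nonneg a hb0
      have hml : a % b < b := Int.emod_lt_of_pos a hbpos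
      have hcast : ((a.toNat % b.toNat : Nat) : Int) = a % b := by
        push_cast
        rw [Int.toNat_of_nonneg ha, Int.toNat_of_nonneg hb]
      have htn : (a % b).toNat = a.toNat % b.toNat := by
        rw [← hcast, Int.toNat_natCast]
      rw [pvGcdLoop, if_pos hb0, hmod, ih b (a % b) hb hmn (by omega), htn,
        ← Nat.gcd_rec]

theorem pv_arr_get (n : Int) (i : Nat) (hi : (i : Int) < n) :
    PySem.List.pyGet? (PySem.List.pyRange 1 (n + 1) 1) ((i : Nat) : Int) = some (1 + (i : Int)) := by
  rw [PySem.List.pyRange_one]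
  have h1 : i < ((n + 1) - 1).toNat := by omega
  have h2 : i < n.toNat := by omega
  simp [h2]

theorem pv_arr_getD (n : Int) (i : Nat) (hi : (i : Int) < n) :
    PySem.List.pyGetD (PySem.List.pyRange 1 (n + 1) 1) ((i : Nat) : Int) 0 = 1 + (i : Int) := by
  rw [PySem.List.pyRange_one]
  have h1 : i < ((n + 1) - 1).toNat := by omega
  have h2 : i < n.toNat := by omega
  simp [List.getD, h2]

theorem pvS_cast (n m : Int) (hn : 1 ≤ n) : ((pvS n m : Nat) : Int) = (m - 1) % n := by
  have hs0 : 0 ≤ (m - 1) % n := Int.emod_nonneg _ (by omega)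
  simp [pvS, PySem.Int.mod_eq_emod_of_pos (by omega : (0:Int) < n), Int.toNat_of_nonneg hs0]

theorem pvN_cast (n : Int) (hn : 1 ≤ n) : ((pvN n : Nat) : Int) = n := by
  simp [pvN, Int.toNat_of_nonneg (by omega : (0:Int) ≤ n)]

theorem pv_cast_idx (n m : Int) (hn : 1 ≤ n) (j : Nat) :
    (((j * pvS n m % pvN n : Nat)) : Int) = (j : Int) * ((m - 1) % n) % n := by
  push_cast
  rw [pvS_cast n m hn, pvN_cast n hn]

theorem pv_next (n m : Int) (hn : 1 ≤ n) (k : Nat) :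
    PySem.Int.mod ((((k * pvS n m % pvN n : Nat)) : Int) + m - 1) n
      = (((k + 1) * pvS n m % pvN n : Nat) : Int) := by
  have hkey : ((k : Int) * ((m - 1) % n) % n + m - 1) % n
      = (((k : Int) + 1) * ((m - 1) % n)) % n := by
    rw [show (k : Int) * ((m - 1) % n) % n + m - 1
          = (k : Int) * ((m - 1) % n) % n + (m - 1) from by ring,
      Int.emod_add_emod,
      show ((k : Int) + 1) * ((m - 1) % n) = (k : Int) * ((m - 1) % n) + (m - 1) % n from by ring,
      Int.add_emod ((k : Int) * ((m - 1) % n)) (m - 1),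
      Int.add_emod ((k : Int) * ((m - 1) % n)) ((m - 1) % n),
      Int.emod_emod_of_dvd (m - 1) dvd_rfl]
  rw [PySem.Int.mod_eq_emod_of_pos (by omega : (0:Int) < n), pv_cast_idx n m hn k,
    pv_cast_idx n m hn (k + 1), Nat.cast_add, Nat.cast_one, hkey]

theorem pv_mod_cast (n : Int) (hn : 1 ≤ n) (x : Nat) :
    PySem.Int.mod ((x : Nat) : Int) n = ((x % pvN n : Nat) : Int) := by
  conv_lhs => rw [← pvN_cast n hn]
  simp [PySem.Int.mod_natCast]

theorem pvC_pos (n m : Int) (hn : 1 ≤ n) : 1 ≤ pvC n m :=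
  Nat.div_pos (Nat.le_of_dvd (pvN_pos n hn) (Nat.gcd_dvd_left _ _))
    (Nat.gcd_pos_of_pos_left _ (pvN_pos n hn))

theorem pvC_le (n m : Int) : pvC n m ≤ pvN n := Nat.div_le_self _ _

theorem pv_mod_zero_iff (n m : Int) (hn : 1 ≤ n) (k : Nat) :
    k * pvS n m % pvN n = 0 ↔ pvC n m ∣ k := by
  constructor
  · intro h
    exact (pv_dvd_iff (pvN n) (pvS n m) k (pvN_pos n hn)).mp (Nat.dvd_of_mod_eq_zero h)
  · intro h
    exact Nat.dvd_iff_mod_eq_zero.mp ((pv_dvd_iff (pvN n) (pvS n m) k (pvN_pos n hn)).mpr h)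

theorem pv_loopA_eq (n m : Int) (hn : 1 ≤ n) :
    ∀ (t : Nat), 1 ≤ t → t ≤ pvC n m → ∀ (fuel : Nat) (path : List Int), t ≤ fuel →
      pvLoopA n m (PySem.List.pyRange 1 (n + 1) 1) fuel
          (((pvC n m - t) * pvS n m % pvN n : Nat) : Int) path
        = path ++ (List.range' (pvC n m - t) t).map (pvF n m) := by
  intro t
  induction t with
  | zero => intro h; omega
  | succ t' ih =>
    intro _ htc fuel path hf
    obtain ⟨f, rfl⟩ : ∃ f, fuel = f + 1 := ⟨fuel - 1, by omega⟩
    set k := pvC n m - (t' + 1) with hk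
    have hidx : ((k * pvS n m % pvN n : Nat) : Int) < n := by
      have h1 : k * pvS n m % pvN n < pvN n := Nat.mod_lt _ (pvN_pos n hn)
      have h2 := pvN_cast n hn
      omega
    rw [pvLoopA, pv_arr_get n _ hidx]
    simp only
    rw [pv_next n m hn k]
    by_cases ht0 : t' = 0
    · subst ht0
      have hck : k + 1 = pvC n m := by have := pvC_pos n m hn; omega
      have hz : (k + 1) * pvS n m % pvN n = 0 := by
        rw [pv_mod_zero_iff n m hn, hck]
      rw [hz]
      simp [pvF, add_comm]
    · have hnd : ¬ pvC n m ∣ (k + 1) := by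
        intro hdvd
        have h1 : 0 < k + 1 := by omega
        have h2 : k + 1 < pvC n m := by omega
        have := Nat.le_of_dvd h1 hdvd
        omega
      have hnz : (k + 1) * pvS n m % pvN n ≠ 0 := fun hz =>
        hnd ((pv_mod_zero_iff n m hn (k + 1)).mp hz)
      rw [if_neg (by exact_mod_cast hnz)]
      have hk1 : k + 1 = pvC n m - t' := by omega
      rw [hk1, ih (by omega) (by omega) f (path ++ [_]) (by omega), List.range'_succ, hk1]
      simp [pvF, add_comm]

theorem pvA_eq (n m : Int) (hn : 1 ≤ n) :
    generate_circular_path n m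
      = PySem.Str.join "" (((List.range (pvC n m)).map (pvF n m)).map PySem.Int.toStr) := by
  simp only [generate_circular_path]
  have hfuel : pvC n m ≤ n.toNat + 1 := by
    have := pvC_le n m; simp [pvN] at this; omega
  have h := pv_loopA_eq n m hn (pvC n m) (pvC_pos n m hn) le_rfl (n.toNat + 1) [] hfuel
  simp only [Nat.sub_self, Nat.zero_mul, Nat.zero_mod, Nat.cast_zero, List.nil_append] at h
  rw [h, List.range_eq_range']

theorem pvB_eq (n m : Int) (hn : 1 ≤ n) :
    generate_circular_path_alt n m
      = PySem.Str.join "" (((List.range (pvC n m)).map (pvF n m)).map PySem.Int.toStr) := by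
  have hget : PySem.List.pyGet? (PySem.List.pyRange 1 (n + 1) 1) 0 = some 1 := by
    have := pv_arr_get n 0 (by omega)
    simpa using this
  simp only [generate_circular_path_alt, hget]
  have hstep0 : 0 ≤ PySem.Int.mod (m - 1) n := by
    rw [PySem.Int.mod_eq_emod_of_pos (by omega : (0:Int) < n)]
    exact Int.emod_nonneg _ (by omega)
  have hstepS : PySem.Int.mod (m - 1) n = ((pvS n m : Nat) : Int) := by
    rw [PySem.Int.mod_eq_emod_of_pos (by omega : (0:Int) < n)]
    exact (pvS_cast n m hn).symm
  have hfuel : (PySem.Int.mod (m - 1) n).toNat < n.natAbs + 1 := by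
    have h1 : PySem.Int.mod (m - 1) n < n := by
      rw [PySem.Int.mod_eq_emod_of_pos (by omega : (0:Int) < n)]
      exact Int.emod_lt_of_pos _ (by omega)
    omega
  have hgcd : pvGcdLoop (n.natAbs + 1) n (PySem.Int.mod (m - 1) n)
      = ((Nat.gcd (pvN n) (pvS n m) : Nat) : Int) := by
    rw [pv_gcdLoop_eq (n.natAbs + 1) n _ (by omega) hstep0 hfuel, Nat.gcd_comm]
    rfl
  have hcount : PySem.Int.floordiv n (pvGcdLoop (n.natAbs + 1) n (PySem.Int.mod (m - 1) n))
      = ((pvC n m : Nat) : Int) := by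
    rw [hgcd, ← pvN_cast n hn, PySem.Int.floordiv_natCast]
    rfl
  rw [hcount]
  have hlist : (PySem.List.pyRange 1 ((pvC n m : Nat) : Int) 1).map
        (fun k => PySem.List.pyGetD (PySem.List.pyRange 1 (n + 1) 1)
          (PySem.Int.mod (k * PySem.Int.mod (m - 1) n) n) 0)
      = (List.range (pvC n m - 1)).map (fun k => pvF n m (k + 1)) := by
    rw [PySem.List.pyRange_one 1 ((pvC n m : Nat) : Int)]
    have hc1 : (((pvC n m : Nat) : Int) - 1).toNat = pvC n m - 1 := by omega
    rw [hc1, List.map_map]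
    apply List.map_congr_left
    intro k hk
    have hk' : k < pvC n m - 1 := List.mem_range.mp hk
    have hmod : PySem.Int.mod ((1 + (k : Int)) * PySem.Int.mod (m - 1) n) n
        = (((k + 1) * pvS n m % pvN n : Nat) : Int) := by
      rw [hstepS,
        show (1 + (k : Int)) * ((pvS n m : Nat) : Int) = (((k + 1) * pvS n m : Nat) : Int) from by
          push_cast; ring,
        pv_mod_cast n hn _]
    have hidx : (((k + 1) * pvS n m % pvN n : Nat) : Int) < n := by
      have h1 : (k + 1) * pvS n m % pvN n < pvN n := Nat.mod_lt _ (pvN_pos n hn)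
      have h2 := pvN_cast n hn
      omega
    simp only [Function.comp_apply]
    rw [hmod, pv_arr_getD n _ hidx]
    simp [pvF, add_comm]
  rw [hlist]
  have hfinal : (1 : Int) :: (List.range (pvC n m - 1)).map (fun k => pvF n m (k + 1))
      = (List.range (pvC n m)).map (pvF n m) := by
    rw [show pvC n m = (pvC n m - 1) + 1 from by have := pvC_pos n m hn; omega,
      List.range_succ_eq_map, List.map_cons, List.map_map]
    congr 1
    · simp [pvF]
  rw [← hfinal]

-- ===== VERDICT (by name: the statement is the Claim_ definition above) =====
theorem generate_circular_path_spec : Claim_equal_generate_circular_path := by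
  intro n m _hdom hpre
  unfold Spec_generate_circular_path
  have hn : 1 ≤ n := hpre
  rw [pvA_eq n m hn, pvB_eq n m hn]
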